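-- pv_equiv track=rewrite | github.com/minorumochizuki2015-ship-it/MOC | .trae/apk_analysis_system/dist/apk-analysis-system-1.0.0-portable/core/utils/intelligent_clone_generator.py | _is_game_logic_class
-- ===== SOURCE A (Python) =====
-- def _is_game_logic_class(content: str, filename: str) -> bool:
--     """ゲームロジックに関連するクラスかどうかを判定"""
--     game_keywords = [
--         "game", "player", "enemy", "score", "level", "manager",
--         "controller", "system", "logic", "state", "input"
--     ]
--
--     filename_lower = filename.lower()
--     content_lower = content.lower()
--
--     return any(keyword in filename_lower or keyword in content_lower for keyword in game_keywords)
-- ===== SOURCE B (Python) =====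
-- _GAME_KEYWORDS = [
--     "game", "player", "enemy", "score", "level", "manager",
--     "controller", "system", "logic", "state", "input"
-- ]
--
--
-- def _scan(s: str) -> bool:
--     """Single left-to-right pass: at each position test whether some keyword starts there."""
--     t = s.lower()
--     for i in range(len(t)):
--         for kw in _GAME_KEYWORDS:
--             if t.startswith(kw, i):
--                 return True
--     return False
--
--
-- def _is_game_logic_class(content: str, filename: str) -> bool:
--     return _scan(filename) or _scan(content)
-- ===== Notes on version B (the rewrite author's own statement) =====
-- stated objective: alternative
-- what changed: A runs 11 separate substring-containment passes ('kw in s') over each lowered string; B makes one left-to-right scan per string, testing at each position whether any keyword starts there (a hand-rolled multi-pattern prefix scan), short-circuiting at the first hit.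
import Mathlib
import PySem

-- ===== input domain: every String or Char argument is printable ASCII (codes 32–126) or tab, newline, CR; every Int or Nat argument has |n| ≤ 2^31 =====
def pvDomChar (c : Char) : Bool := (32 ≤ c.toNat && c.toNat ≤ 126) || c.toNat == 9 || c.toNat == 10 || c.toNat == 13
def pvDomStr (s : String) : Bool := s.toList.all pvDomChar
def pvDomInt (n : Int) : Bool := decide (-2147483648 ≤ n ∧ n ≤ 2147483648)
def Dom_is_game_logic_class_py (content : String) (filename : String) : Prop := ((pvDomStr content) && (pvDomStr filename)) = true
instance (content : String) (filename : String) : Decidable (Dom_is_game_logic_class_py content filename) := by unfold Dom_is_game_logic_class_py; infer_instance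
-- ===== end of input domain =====

-- B differs from A: A runs one 'kw in s' containment pass per keyword; B makes a single
-- left-to-right scan per lowered string, testing all keywords as prefixes at each position.

-- ===== PORT A =====
def gameKeywordsA : List String :=
  ["game", "player", "enemy", "score", "level", "manager",
   "controller", "system", "logic", "state", "input"]

def is_game_logic_class_py (content : String) (filename : String) : Bool :=
  let filename_lower := PySem.Str.lower filename
  let content_lower := PySem.Str.lower content
  gameKeywordsA.any (fun keyword =>
    PySem.Str.isIn keyword filename_lower || PySem.Str.isIn keyword content_lower)

-- ===== PORT B =====
def gameKeywordsB : List (List Char) :=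
  ["game".toList, "player".toList, "enemy".toList, "score".toList, "level".toList,
   "manager".toList, "controller".toList, "system".toList, "logic".toList,
   "state".toList, "input".toList]

-- the position loop of _scan: at each suffix, test every keyword as a prefix
def scanGo (l : List Char) : Bool :=
  match l with
  | [] => false
  | _ :: t => gameKeywordsB.any (fun kw => PySem.Chars.startswith l kw) || scanGo t

def scanStr (s : String) : Bool := scanGo (PySem.Chars.lower s.toList)

def is_game_logic_class_py_alt (content : String) (filename : String) : Bool :=
  scanStr filename || scanStr content

-- ===== PRECONDITION & SPEC =====
def Spec_is_game_logic_class_py (content : String) (filename : String) (out : Bool) : Prop := out = is_game_logic_class_py_alt content filename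
instance (content : String) (filename : String) (out : Bool) : Decidable (Spec_is_game_logic_class_py content filename out) := by unfold Spec_is_game_logic_class_py; infer_instance

-- ===== CLAIM (what is proved, stated in full; the proofs are below) =====
def Claim_equal_is_game_logic_class_py : Prop := ∀ (content : String) (filename : String), Dom_is_game_logic_class_py content filename → Spec_is_game_logic_class_py content filename (is_game_logic_class_py content filename)

-- ===== LEMMAS AND PROOFS =====

lemma exists_prefix_drop_cons (k : List Char) (c : Char) (t : List Char) :
    (∃ j, k <+: (c :: t).drop j) ↔ (k <+: c :: t ∨ ∃ j, k <+: t.drop j) := by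
  constructor
  · rintro ⟨j, h⟩
    cases j with
    | zero => exact Or.inl h
    | succ j => exact Or.inr ⟨j, h⟩
  · rintro (h | ⟨j, h⟩)
    · exact ⟨0, h⟩
    · exact ⟨j + 1, h⟩

lemma scanGo_eq_any_isIn (l : List Char) :
    scanGo l = gameKeywordsB.any (fun kw => PySem.Chars.isIn kw l) := by
  rw [Bool.eq_iff_iff]
  induction l with
  | nil =>
    simp only [scanGo, gameKeywordsB]
    decide
  | cons c t ih =>
    rw [scanGo]
    simp only [Bool.or_eq_true, List.any_eq_true, ih,
      ← PySem.Chars.exists_prefix_drop_iff_isIn, PySem.Chars.startswith_iff,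
      exists_prefix_drop_cons]
    constructor
    · rintro (⟨k, hk, h⟩ | ⟨k, hk, h⟩)
      · exact ⟨k, hk, Or.inl h⟩
      · exact ⟨k, hk, Or.inr h⟩
    · rintro ⟨k, hk, h | h⟩
      · exact Or.inl ⟨k, hk, h⟩
      · exact Or.inr ⟨k, hk, h⟩

lemma keywords_bridge :
    gameKeywordsB = gameKeywordsA.map String.toList := by
  decide

-- ===== VERDICT (by name: the statement is the Claim_ definition above) =====
theorem is_game_logic_class_py_spec : Claim_equal_is_game_logic_class_py := by
  intro content filename _
  unfold Spec_is_game_logic_class_py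
  unfold is_game_logic_class_py is_game_logic_class_py_alt scanStr
  rw [Bool.eq_iff_iff]
  simp only [scanGo_eq_any_isIn, keywords_bridge, List.any_map, List.any_eq_true,
    Bool.or_eq_true, Function.comp, PySem.Str.isIn_eq, PySem.Str.toList_lower]
  constructor
  · rintro ⟨k, hk, h | h⟩
    · exact Or.inl ⟨k, hk, h⟩
    · exact Or.inr ⟨k, hk, h⟩
  · rintro (⟨k, hk, h⟩ | ⟨k, hk, h⟩)
    · exact ⟨k, hk, Or.inl h⟩
    · exact ⟨k, hk, Or.inr h⟩
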